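-- pv_equiv track=rewrite | github.com/jonpeder/test_llab | llab/functions.py | newEventID
-- ===== SOURCE A (Python) =====
-- def newEventID(eventID_list, prefix):
--     # Get all IDs that start with the prefix and don't start with prefix_A
--     matching_ids = [
--         i for i in eventID_list
--         if i.startswith(prefix) and not i.startswith(f'{prefix}_A')
--     ]
--
--     if not matching_ids:
--         return f'{prefix}0001'
--
--     # Extract numeric parts
--     numbers = []
--     for id_str in matching_ids:
--         # Get the part after prefix
--         num_part = id_str[len(prefix):]
--         try:
--             numbers.append(int(num_part))
--         except ValueError:
--             continue
--
--     if not numbers: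
--         return f'{prefix}0001'
--
--     max_num = max(numbers)
--     return f'{prefix}{max_num + 1:04d}'
-- ===== SOURCE B (Python) =====
-- def _suffix_value(s, prefix):
--     # Classify one id: its numeric suffix, or None if it does not qualify.
--     if s.startswith(prefix) and not s.startswith(prefix + '_A'):
--         try:
--             return int(s[len(prefix):])
--         except ValueError:
--             return None
--     return None
--
--
-- def _max_suffix(ids, prefix):
--     # Divide and conquer: max qualifying suffix of each half, merged.
--     n = len(ids)
--     if n == 0:
--         return None
--     if n == 1:
--         return _suffix_value(ids[0], prefix)
--     a = _max_suffix(ids[:n // 2], prefix)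
--     b = _max_suffix(ids[n // 2:], prefix)
--     if a is None:
--         return b
--     if b is None:
--         return a
--     return a if a > b else b
--
--
-- def newEventID(eventID_list, prefix):
--     best = _max_suffix(eventID_list, prefix)
--     return f'{prefix}0001' if best is None else f'{prefix}{best + 1:04d}'
-- ===== Notes on version B (the rewrite author's own statement) =====
-- stated objective: alternative
-- what changed: Replaces A's staged list-building passes (filter the matching ids into a list, then collect all parsed suffixes into a second list and take its max) with a recursive divide-and-conquer: a single Option-valued classifier per id and a binary split of the list whose half-maxima are merged, so no intermediate lists of matches/numbers are built and no linear left-to-right loop exists.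
import Mathlib
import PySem

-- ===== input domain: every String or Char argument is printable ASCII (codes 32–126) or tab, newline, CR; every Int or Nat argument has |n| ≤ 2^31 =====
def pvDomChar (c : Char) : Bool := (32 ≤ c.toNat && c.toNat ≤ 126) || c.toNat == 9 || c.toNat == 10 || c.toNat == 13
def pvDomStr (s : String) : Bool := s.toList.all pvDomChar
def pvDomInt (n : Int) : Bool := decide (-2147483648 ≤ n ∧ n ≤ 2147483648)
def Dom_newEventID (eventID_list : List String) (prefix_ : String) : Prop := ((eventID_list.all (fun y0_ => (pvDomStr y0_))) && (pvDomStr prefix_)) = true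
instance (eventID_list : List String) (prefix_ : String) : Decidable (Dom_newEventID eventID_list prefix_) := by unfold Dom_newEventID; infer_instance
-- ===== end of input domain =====

-- B: divide-and-conquer max over an Option-valued per-id classifier instead of A's staged list-building passes; objective: alternative (same cost, no intermediate lists).


-- ===== PORT A =====
def newEventID (eventID_list : List String) (prefix_ : String) : String :=
  let p := prefix_.toList
  let matching_ids := eventID_list.filter (fun i =>
    PySem.Chars.startswith i.toList p && !PySem.Chars.startswith i.toList (p ++ ['_', 'A']))
  if matching_ids = [] then String.ofList (p ++ ['0', '0', '0', '1'])
  else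
    let numbers := matching_ids.foldl (fun ns id_str =>
      match PySem.Int.ofChars? (PySem.List.slice id_str.toList (some (p.length : Int)) none) with
      | some n => ns ++ [n]
      | none => ns) []
    match PySem.List.max? numbers (fun x => x) with
    | none => String.ofList (p ++ ['0', '0', '0', '1'])
    | some max_num => String.ofList (p ++ PySem.Chars.zfill (PySem.Int.toChars (max_num + 1)) 4)

-- ===== PORT B =====
-- _suffix_value: the numeric suffix of one id, or none if it does not qualify
def suffixValue (s : String) (p : List Char) : Option Int :=
  if PySem.Chars.startswith s.toList p && !PySem.Chars.startswith s.toList (p ++ ['_', 'A']) then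
    PySem.Int.ofChars? (PySem.List.slice s.toList (some (p.length : Int)) none)
  else none

-- merge of the two halves' results (B's if-chain on a, b)
def mergeMax (a b : Option Int) : Option Int :=
  match a with
  | none => b
  | some x =>
    match b with
    | none => some x
    | some y => if y < x then some x else some y

-- _max_suffix: divide and conquer over the list (the n = 0 / n = 1 length tests are the two patterns)
def maxSuffix : List String → List Char → Option Int
  | [], _ => none
  | [s], p => suffixValue s p
  | x :: y :: t, p =>
    let n := (x :: y :: t).length
    mergeMax (maxSuffix (PySem.List.slice (x :: y :: t) none (some ((n / 2 : Nat) : Int))) p)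
             (maxSuffix (PySem.List.slice (x :: y :: t) (some ((n / 2 : Nat) : Int)) none) p)
  termination_by ids => ids.length
  decreasing_by
  · rw [PySem.List.slice_to_natCast]; simp [List.length_take]; omega
  · rw [PySem.List.slice_from_natCast]; simp [List.length_drop]; omega

def newEventID_alt (eventID_list : List String) (prefix_ : String) : String :=
  let p := prefix_.toList
  match maxSuffix eventID_list p with
  | none => String.ofList (p ++ ['0', '0', '0', '1'])
  | some best => String.ofList (p ++ PySem.Chars.zfill (PySem.Int.toChars (best + 1)) 4)

-- ===== PRECONDITION & SPEC =====
def Spec_newEventID (eventID_list : List String) (prefix_ : String) (out : String) : Prop := out = newEventID_alt eventID_list prefix_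
instance (eventID_list : List String) (prefix_ : String) (out : String) : Decidable (Spec_newEventID eventID_list prefix_ out) := by unfold Spec_newEventID; infer_instance

-- ===== CLAIM (what is proved, stated in full; the proofs are below) =====
def Claim_equal_newEventID : Prop := ∀ (eventID_list : List String) (prefix_ : String), Dom_newEventID eventID_list prefix_ → Spec_newEventID eventID_list prefix_ (newEventID eventID_list prefix_)

-- ===== LEMMAS AND PROOFS =====

theorem foldl_max_comm (u : List Int) : ∀ (a y : Int),
    u.foldl max (max a y) = max a (u.foldl max y) := by
  induction u with
  | nil => intro a y; rfl
  | cons z u ih =>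
    intro a y
    simp only [List.foldl, max_assoc]
    exact ih a (max y z)

-- Python's max over a concatenation is the merge of the two halves' maxima
theorem max?_append (l r : List Int) :
    PySem.List.max? (l ++ r) (fun x => x) =
      mergeMax (PySem.List.max? l (fun x => x)) (PySem.List.max? r (fun x => x)) := by
  cases l with
  | nil => simp [PySem.List.max?, mergeMax]
  | cons x t =>
    cases r with
    | nil =>
      rw [List.append_nil]
      have h0 : PySem.List.max? ([] : List Int) (fun x => x) = none := rfl
      rw [h0]
      cases PySem.List.max? (x :: t) (fun x => x) <;> rfl
    | cons y u =>
      have h1 : (x :: t) ++ (y :: u) = x :: (t ++ y :: u) := rfl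
      rw [h1, PySem.List.max?_id_cons, PySem.List.max?_id_cons, PySem.List.max?_id_cons]
      simp only [List.foldl_append, List.foldl, mergeMax]
      rw [foldl_max_comm]
      rcases lt_or_ge (u.foldl max y) (t.foldl max x) with h | h
      · simp [h, max_eq_left h.le]
      · simp [not_lt.mpr h, max_eq_right h]

-- mapping the classifier over the list = A's filter-then-parse
theorem filterMap_ite (q : String → Bool) (f : String → Option Int) (l : List String) :
    l.filterMap (fun s => if q s then f s else none) = (l.filter q).filterMap f := by
  induction l with
  | nil => rfl
  | cons h t ih =>
    rw [List.filterMap_cons, List.filter_cons]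
    by_cases hq : q h
    · simp only [hq, ite_true]
      rw [List.filterMap_cons, ih]
    · simp only [hq, Bool.false_eq_true, ite_false, ih]

theorem filterMap_suffixValue (ids : List String) (p : List Char) :
    ids.filterMap (fun s => suffixValue s p) =
      (ids.filter (fun i => PySem.Chars.startswith i.toList p &&
          !PySem.Chars.startswith i.toList (p ++ ['_', 'A']))).filterMap
        (fun i => PySem.Int.ofChars? (PySem.List.slice i.toList (some (p.length : Int)) none)) :=
  filterMap_ite _ _ ids

-- the divide-and-conquer recursion computes Python's max of all classified suffixes
theorem maxSuffix_eq (ids : List String) (p : List Char) :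
    maxSuffix ids p = PySem.List.max? (ids.filterMap (fun s => suffixValue s p)) (fun x => x) := by
  induction ids, p using maxSuffix.induct with
  | case1 p => simp [maxSuffix, PySem.List.max?]
  | case2 s p =>
    cases hv : suffixValue s p <;>
      simp [maxSuffix, hv, PySem.List.max?]
  | case3 x y t p n ih1 ih2 =>
    rw [maxSuffix]
    rw [ih1, ih2, ← max?_append, ← List.filterMap_append,
        PySem.List.slice_to_natCast, PySem.List.slice_from_natCast, List.take_append_drop]

-- A's number-collecting loop is filterMap
theorem foldl_append_opt (f : String → Option Int) (l : List String) (acc : List Int) :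
    l.foldl (fun ns i =>
      match f i with
      | some n => ns ++ [n]
      | none => ns) acc = acc ++ l.filterMap f := by
  induction l generalizing acc with
  | nil => simp
  | cons h t ih => cases hf : f h <;> simp [hf, ih]

theorem main_eq (eventID_list : List String) (prefix_ : String) :
    newEventID eventID_list prefix_ = newEventID_alt eventID_list prefix_ := by
  unfold newEventID newEventID_alt
  simp only
  rw [maxSuffix_eq, filterMap_suffixValue, foldl_append_opt]
  by_cases hm : eventID_list.filter (fun i : String => PySem.Chars.startswith i.toList prefix_.toList &&
      !PySem.Chars.startswith i.toList (prefix_.toList ++ ['_', 'A'])) = []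
  · simp [hm, PySem.List.max?]
  · simp [hm]

-- ===== VERDICT (by name: the statement is the Claim_ definition above) =====
theorem newEventID_spec : Claim_equal_newEventID := by
  intro eventID_list prefix_ _
  unfold Spec_newEventID
  exact main_eq eventID_list prefix_
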